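-- pv_equiv track=rewrite | github.com/Crispy-Mike/PPOIC | АОИС/1_лаба/laba1_functions.py | compute_fractional_part
-- ===== SOURCE A (Python) =====
-- TOTAL_BITS = 32
--
-- def create_bit_array(size=TOTAL_BITS):
--     """Создать массив битов заданного размера, заполненный нулями."""
--     return ["0"] * size
--
-- def decimal_to_binary(number, bits_count):
--     """Перевести десятичное число в двоичный массив (без знака)."""
--     if number < 0:
--         number = 0
--     result = create_bit_array(bits_count)
--     index = 0
--     while number > 0 and index < bits_count:
--         result[bits_count - 1 - index] = str(number % 2)
--         number //= 2
--         index += 1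
--     return result
--
-- def compute_fractional_part(remainder, divisor, precision):
--     """Вычислить дробную часть деления с заданной точностью."""
--     fractional = 0
--     temp_remainder = remainder
--
--     for _ in range(precision):
--         temp_remainder *= 2
--         if temp_remainder >= divisor:
--             fractional = fractional * 2 + 1
--             temp_remainder -= divisor
--         else:
--             fractional = fractional * 2 + 0
--
--     return decimal_to_binary(fractional, precision)
-- ===== SOURCE B (Python) =====
-- def compute_fractional_part(remainder, divisor, precision):
--     """Emit each quotient bit directly as a string, skipping the integer
--     accumulator and the decimal_to_binary decoding pass entirely."""
--     bits = []
--     r = remainder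
--     for _ in range(precision):
--         r *= 2
--         if r >= divisor:
--             r -= divisor
--             bits.append("1")
--         else:
--             bits.append("0")
--     return bits
-- ===== Notes on version B (the rewrite author's own statement) =====
-- stated objective: faster
-- what changed: B emits each quotient bit directly into the output list during the division loop, eliminating A's precision-bit integer accumulator (fractional = fractional*2+bit) and its entire second decimal_to_binary decoding pass over a preallocated array.
import Mathlib
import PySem

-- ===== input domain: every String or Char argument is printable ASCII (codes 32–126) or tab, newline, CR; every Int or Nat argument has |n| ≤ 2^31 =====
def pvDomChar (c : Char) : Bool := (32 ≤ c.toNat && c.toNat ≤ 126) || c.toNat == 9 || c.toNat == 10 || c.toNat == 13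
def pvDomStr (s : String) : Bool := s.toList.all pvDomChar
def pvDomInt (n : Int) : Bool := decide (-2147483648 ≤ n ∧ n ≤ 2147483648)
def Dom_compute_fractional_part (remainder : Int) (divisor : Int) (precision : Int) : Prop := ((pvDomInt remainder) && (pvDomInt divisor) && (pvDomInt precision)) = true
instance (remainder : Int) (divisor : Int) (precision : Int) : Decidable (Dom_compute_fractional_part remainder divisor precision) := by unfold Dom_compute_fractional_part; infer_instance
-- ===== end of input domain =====

-- B emits each quotient bit directly as a list of strings, dropping A's integer
-- accumulator and its whole decimal_to_binary decoding pass (objective: faster, as measured).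

-- ===== PORT A =====
-- create_bit_array: ["0"] * size (negative size gives [])
def pvCreateBitArray (size : Int) : List String := List.replicate size.toNat "0"

-- the while-loop of decimal_to_binary; List.set at (bits_count-1-index).toNat is exact
-- because the loop only runs with 0 ≤ index < bits_count, so the index is in range
def pvD2BLoop (number : Int) (bits_count : Int) (index : Int) (result : List String) : List String :=
  if _h : 0 < number ∧ index < bits_count then
    pvD2BLoop (PySem.Int.floordiv number 2) bits_count (index + 1)
      (result.set (bits_count - 1 - index).toNat (PySem.Int.toStr (PySem.Int.mod number 2)))
  else result
termination_by number.toNat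
decreasing_by
  rw [PySem.Int.floordiv_eq_ediv_of_pos (by omega : (0:Int) < 2)]
  omega

def pvDecimalToBinary (number : Int) (bits_count : Int) : List String :=
  pvD2BLoop (if number < 0 then 0 else number) bits_count 0 (pvCreateBitArray bits_count)

def compute_fractional_part (remainder : Int) (divisor : Int) (precision : Int) : List String :=
  pvDecimalToBinary
    (((PySem.List.pyRange 0 precision 1).foldl
      (fun (s : Int × Int) _ =>
        let t := s.2 * 2
        if divisor ≤ t then (s.1 * 2 + 1, t - divisor) else (s.1 * 2 + 0, t))
      (0, remainder)).1)
    precision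

-- ===== PORT B =====
def compute_fractional_part_alt (remainder : Int) (divisor : Int) (precision : Int) : List String :=
  ((PySem.List.pyRange 0 precision 1).foldl
    (fun (s : List String × Int) _ =>
      let t := s.2 * 2
      if divisor ≤ t then (s.1 ++ ["1"], t - divisor) else (s.1 ++ ["0"], t))
    ([], remainder)).1

-- ===== PRECONDITION & SPEC =====
def Spec_compute_fractional_part (remainder : Int) (divisor : Int) (precision : Int) (out : List String) : Prop := out = compute_fractional_part_alt remainder divisor precision
instance (remainder : Int) (divisor : Int) (precision : Int) (out : List String) : Decidable (Spec_compute_fractional_part remainder divisor precision out) := by unfold Spec_compute_fractional_part; infer_instance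

-- ===== CLAIM (what is proved, stated in full; the proofs are below) =====
def Claim_equal_compute_fractional_part : Prop := ∀ (remainder : Int) (divisor : Int) (precision : Int), Dom_compute_fractional_part remainder divisor precision → Spec_compute_fractional_part remainder divisor precision (compute_fractional_part remainder divisor precision)

-- ===== LEMMAS AND PROOFS =====

-- the n-bit big-endian binary rendering of f (leading zeros kept)
def pvBitsOf (f : Int) : Nat → List String
  | 0 => []
  | n + 1 => pvBitsOf (PySem.Int.floordiv f 2) n ++ [PySem.Int.toStr (PySem.Int.mod f 2)]

theorem pvBitsOf_zero (n : Nat) : pvBitsOf 0 n = List.replicate n "0" := by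
  induction n with
  | zero => rfl
  | succ n ih =>
    rw [pvBitsOf, List.replicate_succ']
    have h1 : PySem.Int.floordiv 0 2 = 0 := by decide
    have h2 : PySem.Int.toStr (PySem.Int.mod 0 2) = "0" := by decide
    rw [h1, h2, ih]

theorem pvBitsOf_step (f b : Int) (n : Nat) (_hf : 0 ≤ f) (hb : b = 0 ∨ b = 1) :
    pvBitsOf (f * 2 + b) (n + 1) = pvBitsOf f n ++ [PySem.Int.toStr b] := by
  rw [pvBitsOf]
  have hd : PySem.Int.floordiv (f * 2 + b) 2 = f := by
    rw [PySem.Int.floordiv_eq_ediv_of_pos (by omega : (0:Int) < 2)]; omega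
  have hm : PySem.Int.mod (f * 2 + b) 2 = b := by
    rw [PySem.Int.mod_eq_emod_of_pos (by omega : (0:Int) < 2)]; omega
  rw [hd, hm]

theorem pvSet_replicate (k : Nat) (v : String) (tail : List String) :
    (List.replicate (k + 1) "0" ++ tail).set k v = List.replicate k "0" ++ v :: tail := by
  induction k with
  | zero => rfl
  | succ k ih => simpa [List.replicate_succ] using ih

theorem pvD2BLoop_eq (k : Nat) : ∀ (number bc index : Int) (tail : List String),
    index = bc - k → 0 ≤ index → 0 ≤ number → number < 2 ^ k →
    pvD2BLoop number bc index (List.replicate k "0" ++ tail) = pvBitsOf number k ++ tail := by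
  induction k with
  | zero =>
    intro number bc index tail hidx _ h0 hlt
    have hz : number = 0 := by
      have : (2:Int) ^ 0 = 1 := by norm_num
      omega
    rw [pvD2BLoop, dif_neg (by omega)]
    simp [pvBitsOf]
  | succ k ih =>
    intro number bc index tail hidx hidx0 h0 hlt
    have hpow : (2:Int) ^ (k + 1) = 2 * 2 ^ k := by ring
    by_cases hn : 0 < number
    · rw [pvD2BLoop, dif_pos ⟨hn, by omega⟩]
      have hpos : (bc - 1 - index) = (k : Int) := by omega
      have htn : (bc - 1 - index).toNat = k := by omega
      rw [htn, pvSet_replicate]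
      have hdiv0 : 0 ≤ PySem.Int.floordiv number 2 := by
        rw [PySem.Int.floordiv_eq_ediv_of_pos (by omega : (0:Int) < 2)]; omega
      have hdivlt : PySem.Int.floordiv number 2 < 2 ^ k := by
        rw [PySem.Int.floordiv_eq_ediv_of_pos (by omega : (0:Int) < 2)]; omega
      rw [ih (PySem.Int.floordiv number 2) bc (index + 1)
            (PySem.Int.toStr (PySem.Int.mod number 2) :: tail) (by omega) (by omega) hdiv0 hdivlt]
      rw [pvBitsOf, List.append_assoc]
      rfl
    · have hz : number = 0 := by omega
      subst hz
      rw [pvD2BLoop, dif_neg (by omega)]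
      rw [pvBitsOf_zero]
  
theorem pvFold_par (divisor : Int) (l : List Int) :
    ∀ (r f : Int) (n : Nat), 0 ≤ f → f < 2 ^ n →
    (l.foldl
        (fun (s : List String × Int) _ =>
          let t := s.2 * 2
          if divisor ≤ t then (s.1 ++ ["1"], t - divisor) else (s.1 ++ ["0"], t))
        (pvBitsOf f n, r))
      = (pvBitsOf ((l.foldl
            (fun (s : Int × Int) _ =>
              let t := s.2 * 2
              if divisor ≤ t then (s.1 * 2 + 1, t - divisor) else (s.1 * 2 + 0, t))
            (f, r)).1) (n + l.length),
         (l.foldl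
            (fun (s : Int × Int) _ =>
              let t := s.2 * 2
              if divisor ≤ t then (s.1 * 2 + 1, t - divisor) else (s.1 * 2 + 0, t))
            (f, r)).2)
      ∧ 0 ≤ (l.foldl
            (fun (s : Int × Int) _ =>
              let t := s.2 * 2
              if divisor ≤ t then (s.1 * 2 + 1, t - divisor) else (s.1 * 2 + 0, t))
            (f, r)).1
      ∧ (l.foldl
            (fun (s : Int × Int) _ =>
              let t := s.2 * 2
              if divisor ≤ t then (s.1 * 2 + 1, t - divisor) else (s.1 * 2 + 0, t))
            (f, r)).1 < 2 ^ (n + l.length) := by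
  induction l with
  | nil =>
    intro r f n h0 hlt
    exact ⟨rfl, h0, hlt⟩
  | cons a l ih =>
    intro r f n h0 hlt
    simp only [List.foldl_cons]
    have hpow : (2:Int) ^ (n + 1) = 2 * 2 ^ n := by ring
    by_cases hc : divisor ≤ r * 2
    · simp only [if_pos hc]
      have hb : pvBitsOf (f * 2 + 1) (n + 1) = pvBitsOf f n ++ [PySem.Int.toStr 1] := 
        pvBitsOf_step f 1 n h0 (Or.inr rfl)
      have h1 : PySem.Int.toStr (1:Int) = "1" := by decide
      rw [h1] at hb
      have := ih (r * 2 - divisor) (f * 2 + 1) (n + 1) (by omega) (by omega)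
      rw [hb] at this
      simpa [Nat.add_comm, Nat.add_assoc, Nat.add_left_comm] using this
    · simp only [if_neg hc]
      have hb : pvBitsOf (f * 2 + 0) (n + 1) = pvBitsOf f n ++ [PySem.Int.toStr 0] := 
        pvBitsOf_step f 0 n h0 (Or.inl rfl)
      have h1 : PySem.Int.toStr (0:Int) = "0" := by decide
      rw [h1] at hb
      have := ih (r * 2) (f * 2 + 0) (n + 1) (by omega) (by omega)
      rw [hb] at this
      simpa [Nat.add_comm, Nat.add_assoc, Nat.add_left_comm] using this

-- ===== VERDICT (by name: the statement is the Claim_ definition above) =====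
theorem compute_fractional_part_spec : Claim_equal_compute_fractional_part := by
  intro remainder divisor precision _dom
  unfold Spec_compute_fractional_part compute_fractional_part compute_fractional_part_alt
  have hlen : (PySem.List.pyRange 0 precision 1).length = (precision - 0).toNat :=
    PySem.List.length_pyRange_one 0 precision
  have hpar := pvFold_par divisor (PySem.List.pyRange 0 precision 1) remainder 0 0
      le_rfl (by norm_num)
  have hbits0 : pvBitsOf 0 0 = [] := rfl
  rw [hbits0] at hpar
  obtain ⟨heq, hF0, hFlt⟩ := hpar
  rw [heq]
  unfold pvDecimalToBinary pvCreateBitArray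
  set F := ((PySem.List.pyRange 0 precision 1).foldl
      (fun (s : Int × Int) _ =>
        let t := s.2 * 2
        if divisor ≤ t then (s.1 * 2 + 1, t - divisor) else (s.1 * 2 + 0, t))
      (0, remainder)).1 with hFdef
  rw [if_neg (by omega : ¬ F < 0)]
  rw [hlen] at hFlt ⊢
  have hsub : precision - 0 = precision := by ring
  rw [hsub] at hFlt ⊢
  by_cases hp : 0 ≤ precision
  · have := pvD2BLoop_eq precision.toNat F precision 0 [] (by omega) le_rfl hF0
        (by simpa [Nat.zero_add] using hFlt)
    rw [List.append_nil] at this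
    rw [this]
    simp
  · have htn : precision.toNat = 0 := by omega
    rw [htn] at hFlt ⊢
    have hz : F = 0 := by
      have : (2:Int) ^ (0 + 0) = 1 := by norm_num
      omega
    rw [hz, pvD2BLoop, dif_neg (by omega)]
    simp [pvBitsOf]
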